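-- pv_equiv track=rewrite | github.com/m6tak/advent-of-code-2020 | 06/main.py | partI
-- ===== SOURCE A (Python) =====
-- def partI(input_data):
--   questions = 'qwertyuiopasdfghjklzxcvbnm'
--   counts = []
--   for group in input_data:
--     group_count = 0
--     group_total = ''.join(group)
--     for q in questions:
--       if q in group_total: group_count += 1
--
--     counts.append(group_count)
--
--   return sum(counts)
-- ===== SOURCE B (Python) =====
-- def partI(input_data):
--     total = 0
--     for group in input_data:
--         seen = 0
--         for c in ''.join(group):
--             if 'a' <= c <= 'z':
--                 bit = 1 << (ord(c) - 97)
--                 if seen & bit == 0: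
--                     seen |= bit
--                     total += 1
--     return total
-- ===== Notes on version B (the rewrite author's own statement) =====
-- stated objective: alternative
-- what changed: Instead of A's per-group scan over the 26 fixed letters with one substring test each, B makes a single left-to-right pass over the group's characters, maintaining a 26-bit seen bitmask and incrementing one running total at each lowercase letter's first occurrence (no per-group counts list).
import Mathlib
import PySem

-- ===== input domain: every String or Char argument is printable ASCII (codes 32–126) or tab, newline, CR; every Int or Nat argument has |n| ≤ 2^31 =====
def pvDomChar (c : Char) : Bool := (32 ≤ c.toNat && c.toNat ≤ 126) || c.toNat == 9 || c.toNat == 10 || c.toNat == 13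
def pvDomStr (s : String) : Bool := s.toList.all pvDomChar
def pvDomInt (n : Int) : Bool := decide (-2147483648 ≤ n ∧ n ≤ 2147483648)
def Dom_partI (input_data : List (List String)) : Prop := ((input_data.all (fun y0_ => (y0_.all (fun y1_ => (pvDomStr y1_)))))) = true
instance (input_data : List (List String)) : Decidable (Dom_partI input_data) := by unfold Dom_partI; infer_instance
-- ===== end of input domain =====

-- B replaces A's per-group scan over the 26 fixed letters (one substring test each)
-- with a single left-to-right pass over the group's characters, maintaining a 26-bit
-- "seen" bitmask and incrementing one running total at each letter's first occurrence
-- (objective: alternative; same exact result).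

-- ===== PORT A =====
def partI (input_data : List (List String)) : Int :=
  let questions : String := "qwertyuiopasdfghjklzxcvbnm"
  let counts : List Int := input_data.foldl (fun counts group =>
    let group_total := PySem.Str.join "" group
    let group_count := questions.toList.foldl (fun gc q =>
      if PySem.Str.isIn (String.ofList [q]) group_total = true then gc + 1 else gc) (0 : Int)
    counts ++ [group_count]) []
  counts.sum

-- ===== PORT B =====
-- body of B's inner loop: Python's `if 'a' <= c <= 'z': bit = 1 << (ord(c)-97);
-- if seen & bit == 0: seen |= bit; total += 1`; seen is a nonnegative int bitmask,
-- ported as Nat.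
def pvStepB (st : Nat × Int) (c : Char) : Nat × Int :=
  if 'a' ≤ c ∧ c ≤ 'z' then
    let bit := 1 <<< (c.toNat - 97)
    if st.1 &&& bit = 0 then (st.1 ||| bit, st.2 + 1) else st
  else st

def partI_alt (input_data : List (List String)) : Int :=
  input_data.foldl (fun total group =>
    (((PySem.Str.join "" group).toList).foldl pvStepB (0, total)).2) 0

-- ===== PRECONDITION & SPEC =====
def Spec_partI (input_data : List (List String)) (out : Int) : Prop := out = partI_alt input_data
instance (input_data : List (List String)) (out : Int) : Decidable (Spec_partI input_data out) := by unfold Spec_partI; infer_instance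

-- ===== CLAIM (what is proved, stated in full; the proofs are below) =====
def Claim_equal_partI : Prop := ∀ (input_data : List (List String)), Dom_partI input_data → Spec_partI input_data (partI input_data)

-- ===== LEMMAS AND PROOFS =====

-- the 26 lowercase letters, in A's order
def lcQ : List Char := "qwertyuiopasdfghjklzxcvbnm".toList

def pvIdx (c : Char) : Nat := c.toNat - 97

-- bitmask of a list of seen letters
def pvMask : List Char → Nat
  | [] => 0
  | d :: s => (1 <<< pvIdx d) ||| pvMask s

lemma testBit_mask (s : List Char) (i : Nat) :
    (pvMask s).testBit i = s.any (fun d => pvIdx d == i) := by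
  induction s with
  | nil => simp [pvMask]
  | cons d s ih =>
    simp only [pvMask, Nat.testBit_or, ih, Nat.shiftLeft_eq, one_mul, Nat.testBit_two_pow,
      List.any_cons]
    by_cases h : pvIdx d = i
    · simp [h]
    · simp [h]

lemma and_bit_eq_zero (m i : Nat) : (m &&& (1 <<< i) = 0) ↔ m.testBit i = false := by
  rw [Nat.shiftLeft_eq, one_mul, Nat.and_two_pow]
  rcases h : m.testBit i <;> simp

lemma lower_toNat {c : Char} (h1 : 'a' ≤ c) (h2 : c ≤ 'z') :
    97 ≤ c.toNat ∧ c.toNat ≤ 122 := by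
  simp [Char.le_def, UInt32.le_iff_toNat_le] at h1 h2
  exact ⟨h1, h2⟩

lemma lower_idx_inj {c d : Char} (hc : 'a' ≤ c ∧ c ≤ 'z') (hd : 'a' ≤ d ∧ d ≤ 'z')
    (h : pvIdx d = pvIdx c) : d = c := by
  obtain ⟨hc1, hc2⟩ := lower_toNat hc.1 hc.2
  obtain ⟨hd1, hd2⟩ := lower_toNat hd.1 hd.2
  unfold pvIdx at h
  have : d.toNat = c.toNat := by omega
  have := congrArg Char.ofNat this
  rwa [Char.ofNat_toNat, Char.ofNat_toNat] at this

set_option maxRecDepth 10000 in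
lemma mem_lcQ_of_lower {c : Char} (h1 : 'a' ≤ c) (h2 : c ≤ 'z') : c ∈ lcQ := by
  obtain ⟨hb1, hb2⟩ := lower_toNat h1 h2
  have hr : c.toNat ∈ List.range' 97 26 :=
    List.mem_range'.mpr ⟨c.toNat - 97, by omega, by omega⟩
  have key : ∀ n ∈ List.range' 97 26, Char.ofNat n ∈ lcQ := by
    unfold lcQ; decide
  have := key _ hr
  rwa [Char.ofNat_toNat] at this

set_option maxRecDepth 10000 in
lemma lcQ_nodup : lcQ.Nodup := by decide

lemma lcQ_toNat_all : lcQ.all (fun q => 97 ≤ q.toNat && q.toNat ≤ 122) = true := by decide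

lemma lower_of_toNat {c : Char} (h1 : 97 ≤ c.toNat) (h2 : c.toNat ≤ 122) :
    'a' ≤ c ∧ c ≤ 'z' := by
  constructor <;> · rw [Char.le_def, UInt32.le_iff_toNat_le]; exact (by assumption)

lemma lcQ_lower : ∀ q ∈ lcQ, 'a' ≤ q ∧ q ≤ 'z' := by
  intro q hq
  have := List.all_eq_true.mp lcQ_toNat_all q hq
  simp at this
  exact lower_of_toNat this.1 this.2

-- counting split when a fresh letter c is consumed
lemma countP_cons_split (Qn : List Char) (hQ : Qn.Nodup) (c : Char) (hc : c ∈ Qn)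
    (L s : List Char) (hcs : c ∉ s) :
    Qn.countP (fun q => decide (q ∈ (c :: L) ∧ q ∉ s))
      = 1 + Qn.countP (fun q => decide (q ∈ L ∧ q ∉ (c :: s))) := by
  induction Qn with
  | nil => simp at hc
  | cons q Qn ih =>
    rcases List.nodup_cons.mp hQ with ⟨hqQ, hQn⟩
    by_cases hqc : q = c
    · subst hqc
      have h1 : decide (q ∈ (q :: L) ∧ q ∉ s) = true := by simp [hcs]
      have h2 : decide (q ∈ L ∧ q ∉ (q :: s)) = false := by simp
      have h3 : Qn.countP (fun x => decide (x ∈ (q :: L) ∧ x ∉ s))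
          = Qn.countP (fun x => decide (x ∈ L ∧ x ∉ (q :: s))) := by
        apply List.countP_congr
        intro x hx
        have hxq : x ≠ q := fun h => hqQ (h ▸ hx)
        simp [hxq]
      rw [List.countP_cons, List.countP_cons, h1, h2, h3]
      simp [Nat.add_comm]
    · have hcQn : c ∈ Qn := by
        rcases List.mem_cons.mp hc with h | h
        · exact absurd h.symm hqc
        · exact h
      have h12 : decide (q ∈ (c :: L) ∧ q ∉ s)
          = decide (q ∈ L ∧ q ∉ (c :: s)) := by
        simp [hqc]
      rw [List.countP_cons, List.countP_cons, h12, ih hQn hcQn]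
      omega

-- B's inner loop computes, over the suffix L, the number of letters of lcQ that
-- occur in L and are not yet in the seen set s
lemma inner_loop (L : List Char) (s : List Char) (hs : ∀ d ∈ s, 'a' ≤ d ∧ d ≤ 'z')
    (t : Int) :
    (L.foldl pvStepB (pvMask s, t)).2
      = t + (lcQ.countP (fun q => decide (q ∈ L ∧ q ∉ s)) : Int) := by
  induction L generalizing s t with
  | nil => simp
  | cons c L ih =>
    by_cases hc : 'a' ≤ c ∧ c ≤ 'z'
    · by_cases hmem : c ∈ s
      · have hbit : (pvMask s).testBit (pvIdx c) = true := by
          rw [testBit_mask]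
          exact List.any_eq_true.mpr ⟨c, hmem, by simp⟩
        have hstep : pvStepB (pvMask s, t) c = (pvMask s, t) := by
          unfold pvStepB
          rw [if_pos hc, if_neg]
          rw [and_bit_eq_zero]
          simp [pvIdx] at hbit ⊢
          exact hbit
        rw [List.foldl_cons, hstep, ih s hs t]
        congr 1
        norm_cast
        apply List.countP_congr
        intro q hq
        by_cases hqc : q = c
        · subst hqc; simp [hmem]
        · simp [hqc]
      · have hbit : (pvMask s).testBit (pvIdx c) = false := by
          rw [testBit_mask]
          apply List.any_eq_false.mpr
          intro d hd hdc
          exact hmem ((lower_idx_inj hc (hs d hd) (by simpa using hdc)) ▸ hd)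
        have hstep : pvStepB (pvMask s, t) c = (pvMask (c :: s), t + 1) := by
          unfold pvStepB
          rw [if_pos hc, if_pos]
          · simp [pvMask, pvIdx, Nat.or_comm]
          · rw [and_bit_eq_zero]
            simpa [pvIdx] using hbit
        have hs' : ∀ d ∈ c :: s, 'a' ≤ d ∧ d ≤ 'z' := by
          intro d hd
          rcases List.mem_cons.mp hd with h | h
          · exact h ▸ hc
          · exact hs d h
        rw [List.foldl_cons, hstep, ih (c :: s) hs' (t + 1)]
        rw [countP_cons_split lcQ lcQ_nodup c (mem_lcQ_of_lower hc.1 hc.2) L s hmem]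
        push_cast
        ring
    · have hstep : pvStepB (pvMask s, t) c = (pvMask s, t) := by
        unfold pvStepB
        rw [if_neg hc]
      rw [List.foldl_cons, hstep, ih s hs t]
      congr 1
      norm_cast
      apply List.countP_congr
      intro q hq
      have hqc : q ≠ c := fun h => hc (h ▸ lcQ_lower q hq)
      simp [hqc]

-- 'q in s' for a single-character needle is list membership
lemma isIn_singleton_iff (q : Char) (L : List Char) :
    PySem.Chars.isIn [q] L = true ↔ q ∈ L := by
  rw [PySem.Chars.isIn_iff_infix]
  constructor
  · intro h
    exact List.singleton_sublist.mp h.sublist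
  · intro h
    obtain ⟨s1, s2, hsplit⟩ := List.append_of_mem h
    exact ⟨s1, s2, by rw [hsplit]; simp⟩

-- A's inner loop over the 26 letters counts the letters present in t
lemma groupA_eq (t : String) :
    (lcQ.foldl (fun gc q =>
        if PySem.Str.isIn (String.ofList [q]) t = true then gc + 1 else gc) (0 : Int))
      = (lcQ.countP (fun q => decide (q ∈ t.toList)) : Int) := by
  rw [PySem.List.foldl_ite_add_one (fun q => PySem.Str.isIn (String.ofList [q]) t = true) lcQ 0]
  rw [zero_add]
  congr 1
  apply List.countP_congr
  intro q _
  have hq1 : (String.ofList [q]).toList = [q] := by simp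
  simp only [PySem.Str.isIn_iff_infix, hq1, decide_eq_true_eq]
  exact Iff.trans (Iff.symm (PySem.Chars.isIn_iff_infix [q] t.toList)) (isIn_singleton_iff q t.toList)

-- B's outer loop accumulates the per-group counts into the running total
lemma outer_loop (gs : List (List String)) (t : Int) :
    gs.foldl (fun total group =>
      (((PySem.Str.join "" group).toList).foldl pvStepB (0, total)).2) t
      = t + (gs.map (fun g =>
          (lcQ.countP (fun q => decide (q ∈ (PySem.Str.join "" g).toList)) : Int))).sum := by
  induction gs generalizing t with
  | nil => simp
  | cons g gs ih =>
    rw [List.foldl_cons]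
    have h0 : (pvMask [] : Nat) = 0 := rfl
    have := inner_loop (PySem.Str.join "" g).toList [] (by intro d h; simp at h) t
    rw [h0] at this
    rw [this, ih]
    simp only [List.map_cons, List.sum_cons]
    have : (lcQ.countP (fun q => decide (q ∈ (PySem.Str.join "" g).toList ∧ q ∉ ([] : List Char))))
        = lcQ.countP (fun q => decide (q ∈ (PySem.Str.join "" g).toList)) := by
      apply List.countP_congr
      intro q _
      simp
    rw [this]
    ring

-- ===== VERDICT (by name: the statement is the Claim_ definition above) =====
theorem partI_spec : Claim_equal_partI := by
  intro input_data _
  unfold Spec_partI partI partI_alt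
  simp only [PySem.List.foldl_append_singleton_eq_map, List.nil_append]
  rw [outer_loop, zero_add]
  congr 1
  apply List.map_congr_left
  intro group _
  exact groupA_eq (PySem.Str.join "" group)
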